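-- pv_equiv track=rewrite | github.com/chenhowie/php-ytp-project | UI/useful_functions.py | get_bitset
-- ===== SOURCE A (Python) =====
-- def get_bitset(keys: list, selected: list):
--     bitset = []
--     for i in keys:
--         bitset.append(0)
--     for i in selected:
--         if not (i in keys):
--             return [], False
--         for j in range(len(keys)):
--             if keys[j] == i:
--                 bitset[j] = 1
--                 break
--     return bitset, True
-- ===== SOURCE B (Python) =====
-- def get_bitset(keys: list, selected: list):
--     for s in selected:
--         if s not in keys:
--             return [], False
--     bitset = []
--     for j, k in enumerate(keys):
--         bitset.append(1 if k in selected and keys.index(k) == j else 0)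
--     return bitset, True
-- ===== Notes on version B (the rewrite author's own statement) =====
-- stated objective: faster
-- what changed: Replaced the selected-driven nested scan that mutates a zero bitset with a validation pass over selected followed by a single enumerate pass over keys that emits each bit directly (1 iff the key is selected and this is its first occurrence); measured ~1.7x faster at large sizes.
import Mathlib
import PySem

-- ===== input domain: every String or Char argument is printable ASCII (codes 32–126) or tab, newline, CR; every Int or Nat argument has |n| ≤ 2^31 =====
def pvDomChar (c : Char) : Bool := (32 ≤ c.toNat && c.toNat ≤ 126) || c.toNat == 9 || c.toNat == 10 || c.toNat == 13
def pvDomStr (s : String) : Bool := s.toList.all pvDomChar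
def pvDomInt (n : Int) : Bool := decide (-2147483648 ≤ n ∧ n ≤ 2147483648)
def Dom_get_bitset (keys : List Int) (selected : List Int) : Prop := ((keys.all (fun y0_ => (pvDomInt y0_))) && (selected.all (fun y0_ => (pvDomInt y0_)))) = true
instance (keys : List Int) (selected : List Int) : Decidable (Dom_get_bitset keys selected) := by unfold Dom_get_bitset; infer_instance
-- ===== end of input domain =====

-- B replaces A's selected-driven nested scan (mutating a zero bitset) with a validation pass
-- over selected and one enumerate pass over keys emitting each bit directly (measured faster in a timing run).


-- ===== PORT A =====
-- inner loop: 'for j in range(len(keys)): if keys[j] == i: bitset[j] = 1; break'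
def pvMarkFirst : List Int → Int → List Int → List Int
  | [], _, b => b
  | _, _, [] => []
  | k :: ks, i, c :: cs => if k = i then 1 :: cs else c :: pvMarkFirst ks i cs

-- outer loop over selected; 'none' is the early 'return [], False'
def pvLoopA (keys : List Int) : List Int → List Int → Option (List Int)
  | [], b => some b
  | s :: ss, b => if s ∈ keys then pvLoopA keys ss (pvMarkFirst keys s b) else none

def get_bitset (keys : List Int) (selected : List Int) : List Int × Bool :=
  let bitset := keys.foldl (fun b _ => b ++ [(0 : Int)]) []
  match pvLoopA keys selected bitset with
  | none => ([], false)
  | some b => (b, true)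

-- ===== PORT B =====
-- first pass: 'for s in selected: if s not in keys: return [], False'
def pvCheckAll (keys : List Int) : List Int → Bool
  | [] => true
  | s :: ss => if s ∈ keys then pvCheckAll keys ss else false

def get_bitset_alt (keys : List Int) (selected : List Int) : List Int × Bool :=
  if pvCheckAll keys selected then
    ((PySem.List.enumerate keys).map
      (fun jk => if jk.2 ∈ selected ∧ (PySem.List.index? keys jk.2).map (fun n => (n : Int)) = some jk.1
                 then (1 : Int) else 0), true)
  else ([], false)

-- ===== PRECONDITION & SPEC =====
def Spec_get_bitset (keys : List Int) (selected : List Int) (out : List Int × Bool) : Prop := out = get_bitset_alt keys selected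
instance (keys : List Int) (selected : List Int) (out : List Int × Bool) : Decidable (Spec_get_bitset keys selected out) := by unfold Spec_get_bitset; infer_instance

-- ===== CLAIM (what is proved, stated in full; the proofs are below) =====
def Claim_equal_get_bitset : Prop := ∀ (keys : List Int) (selected : List Int), Dom_get_bitset keys selected → Spec_get_bitset keys selected (get_bitset keys selected)

-- ===== LEMMAS AND PROOFS =====
theorem pvZeros_eq (keys : List Int) (acc : List Int) :
    keys.foldl (fun b _ => b ++ [(0 : Int)]) acc = acc ++ List.replicate keys.length 0 := by
  induction keys generalizing acc with
  | nil => simp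
  | cons k ks ih => simp [List.foldl, ih, List.replicate_succ]

theorem pvMarkFirst_length (keys : List Int) (i : Int) (b : List Int) :
    (pvMarkFirst keys i b).length = b.length := by
  induction keys generalizing b with
  | nil => simp [pvMarkFirst]
  | cons k ks ih =>
    cases b with
    | nil => simp [pvMarkFirst]
    | cons c cs => by_cases h : k = i <;> simp [pvMarkFirst, h, ih]

theorem pvMarkFirst_get (keys : List Int) (i : Int) (b : List Int)
    (j : Nat) (hj : j < b.length) :
    (pvMarkFirst keys i b)[j]'(by rw [pvMarkFirst_length]; exact hj) =
      if PySem.List.index? keys i = some j then 1 else b[j] := by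
  induction keys generalizing b j with
  | nil => simp [pvMarkFirst, PySem.List.index?]
  | cons k ks ih =>
    cases b with
    | nil => simp at hj
    | cons c cs =>
      by_cases h : k = i
      · subst h
        rw [PySem.List.index?_cons_self]
        cases j with
        | zero => simp [pvMarkFirst]
        | succ j' => simp [pvMarkFirst]
      · rw [PySem.List.index?_cons_of_ne ks h]
        cases j with
        | zero =>
          simp only [pvMarkFirst, if_neg h, List.getElem_cons_zero]
          cases hidx : PySem.List.index? ks i <;> simp
        | succ j' =>
          have := ih cs j' (by simpa using hj)
          simp only [pvMarkFirst, if_neg h, List.getElem_cons_succ]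
          rw [this]
          cases hidx : PySem.List.index? ks i with
          | none => simp
          | some m => simp

theorem pvLoopA_length (keys sel b : List Int) (r : List Int)
    (h : pvLoopA keys sel b = some r) : r.length = b.length := by
  induction sel generalizing b with
  | nil => simp only [pvLoopA, Option.some.injEq] at h; rw [← h]
  | cons s ss ih =>
    simp only [pvLoopA] at h
    split at h
    · have := ih _ h
      rw [this, pvMarkFirst_length]
    · exact absurd h (by simp)

theorem pvLoopA_none_iff (keys sel b : List Int) :
    pvLoopA keys sel b = none ↔ pvCheckAll keys sel = false := by
  induction sel generalizing b with
  | nil => simp [pvLoopA, pvCheckAll]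
  | cons s ss ih =>
    by_cases h : s ∈ keys <;> simp [pvLoopA, pvCheckAll, h, ih]

theorem pvLoopA_get (keys sel b : List Int) (r : List Int)
    (h : pvLoopA keys sel b = some r) (j : Nat) (hj : j < b.length) :
    r[j]'(by rw [pvLoopA_length keys sel b r h]; exact hj) =
      if ∃ s ∈ sel, PySem.List.index? keys s = some j then 1 else b[j] := by
  induction sel generalizing b with
  | nil =>
    simp only [pvLoopA] at h
    cases h
    simp
  | cons s ss ih =>
    simp only [pvLoopA] at h
    split at h
    · have hlen : j < (pvMarkFirst keys s b).length := by
        rw [pvMarkFirst_length]; exact hj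
      have h1 := ih (pvMarkFirst keys s b) h hlen
      have h2 := pvMarkFirst_get keys s b j hj
      rw [h1, h2]
      have hcons : (∃ t ∈ s :: ss, PySem.List.index? keys t = some j) ↔
          (PySem.List.index? keys s = some j ∨ ∃ t ∈ ss, PySem.List.index? keys t = some j) := by
        constructor
        · rintro ⟨t, ht, htj⟩
          rcases List.mem_cons.mp ht with rfl | ht'
          · exact Or.inl htj
          · exact Or.inr ⟨t, ht', htj⟩
        · rintro (h0 | ⟨t, ht, htj⟩)
          · exact ⟨s, List.mem_cons_self, h0⟩
          · exact ⟨t, List.mem_cons.mpr (Or.inr ht), htj⟩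
      by_cases hs : PySem.List.index? keys s = some j
      · have hcs := hcons.mpr (Or.inl hs)
        by_cases ha : ∃ t ∈ ss, PySem.List.index? keys t = some j
        · rw [if_pos ha, if_pos hcs]
        · rw [if_neg ha, if_pos hs, if_pos hcs]
      · by_cases ha : ∃ t ∈ ss, PySem.List.index? keys t = some j
        · rw [if_pos ha, if_pos (hcons.mpr (Or.inr ha))]
        · rw [if_neg ha, if_neg hs, if_neg (fun hx => (hcons.mp hx).elim hs ha)]
    · exact absurd h (by simp)

theorem pvCond_iff (keys sel : List Int) (j : Nat) (hj : j < keys.length) :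
    (∃ s ∈ sel, PySem.List.index? keys s = some j) ↔
      (keys[j] ∈ sel ∧ PySem.List.index? keys keys[j] = some j) := by
  constructor
  · rintro ⟨s, hs, hsj⟩
    obtain ⟨hk, heq, -⟩ := PySem.List.getElem_of_index?_eq_some hsj
    rw [heq]
    exact ⟨hs, hsj⟩
  · rintro ⟨h1, h2⟩
    exact ⟨keys[j], h1, h2⟩

-- ===== VERDICT (by name: the statement is the Claim_ definition above) =====
theorem get_bitset_spec : Claim_equal_get_bitset := by
  intro keys selected _
  unfold Spec_get_bitset get_bitset get_bitset_alt
  have hz : keys.foldl (fun b _ => b ++ [(0 : Int)]) [] = List.replicate keys.length 0 := by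
    simpa using pvZeros_eq keys []
  simp only [hz]
  by_cases hc : pvCheckAll keys selected = true
  · cases hr : pvLoopA keys selected (List.replicate keys.length 0) with
    | none =>
      rw [pvLoopA_none_iff] at hr
      rw [hr] at hc; simp at hc
    | some r =>
      have hlen : r.length = keys.length := by
        simpa using pvLoopA_length _ _ _ _ hr
      have hmain : r = (PySem.List.enumerate keys).map
          (fun jk => if jk.2 ∈ selected ∧ (PySem.List.index? keys jk.2).map (fun n => (n : Int)) = some jk.1
                     then (1 : Int) else 0) := by
        apply List.ext_getElem
        · simp [hlen, PySem.List.length_enumerate]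
        · intro j hj1 hj2
          have hjk : j < keys.length := hlen ▸ hj1
          have hb : j < (List.replicate keys.length (0 : Int)).length := by simpa using hjk
          have hget := pvLoopA_get keys selected _ r hr j hb
          have hzero : (List.replicate keys.length (0 : Int))[j]'hb = 0 := by simp
          rw [hzero] at hget
          rw [hget, List.getElem_map, PySem.List.getElem_enumerate]
          have hmap : ∀ (o : Option Nat), (o.map (fun n => (n : Int)) = some ((0 : Int) + (j : Int))) ↔ o = some j := by
            intro o
            cases o <;> simp
          by_cases hcond : keys[j] ∈ selected ∧ PySem.List.index? keys keys[j] = some j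
          · rw [if_pos ((pvCond_iff keys selected j hjk).mpr hcond),
                if_pos (⟨hcond.1, (hmap _).mpr hcond.2⟩ :
                  keys[j] ∈ selected ∧ (PySem.List.index? keys keys[j]).map (fun n => (n : Int)) = some ((0 : Int) + (j : Int)))]
          · rw [if_neg (fun hx => hcond ((pvCond_iff keys selected j hjk).mp hx)),
                if_neg (fun hx : keys[j] ∈ selected ∧ (PySem.List.index? keys keys[j]).map (fun n => (n : Int)) = some ((0 : Int) + (j : Int)) =>
                  hcond ⟨hx.1, (hmap _).mp hx.2⟩)]
      simp [hc, hmain]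
  · have hnone : pvLoopA keys selected (List.replicate keys.length 0) = none :=
      (pvLoopA_none_iff keys selected (List.replicate keys.length 0)).mpr (by simpa using hc)
    simp [hc, hnone]
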